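-- pv_equiv track=rewrite | github.com/hyjcde/PVcountingLLM | image_registration.py | _cluster_coordinates
-- ===== SOURCE A (Python) =====
-- from typing import Any, Dict, List, Optional, Tuple
--
-- def _cluster_coordinates(coords: List[int], tolerance: int = 30) -> List[int]:
--     """
--     聚类坐标
--
--     Args:
--         coords: 坐标列表
--         tolerance: 聚类容差
--
--     Returns:
--         聚类中心列表
--     """
--     if not coords:
--         return []
--
--     coords_sorted = sorted(coords)
--     clusters = []
--     current_cluster = [coords_sorted[0]]
--
--     for coord in coords_sorted[1:]:
--         if coord - current_cluster[-1] <= tolerance: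
--             current_cluster.append(coord)
--         else:
--             # 计算当前聚类的中心
--             cluster_center = sum(current_cluster) // len(current_cluster)
--             clusters.append(cluster_center)
--             current_cluster = [coord]
--
--     # 添加最后一个聚类
--     if current_cluster:
--         cluster_center = sum(current_cluster) // len(current_cluster)
--         clusters.append(cluster_center)
--
--     return clusters
-- ===== SOURCE B (Python) =====
-- def _cluster_coordinates(coords, tolerance=30):
--     """Top-down divide and conquer: recursively split the sorted list at its
--     widest gap while that gap exceeds tolerance; each remaining block becomes
--     one cluster, emitted as its floor-average center."""
--     cs = sorted(coords)
--
--     def solve(seg):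
--         if not seg:
--             return []
--         if len(seg) >= 2:
--             k = max(range(1, len(seg)), key=lambda i: seg[i] - seg[i - 1])
--             if seg[k] - seg[k - 1] > tolerance:
--                 return solve(seg[:k]) + solve(seg[k:])
--         return [sum(seg) // len(seg)]
--
--     return solve(cs)
-- ===== Notes on version B (the rewrite author's own statement) =====
-- stated objective: alternative
-- what changed: B replaces A's left-to-right agglomerative scan (grow a current cluster, emit on a big gap) by top-down divide-and-conquer: recursively split the sorted list at its widest gap while that gap exceeds tolerance, then emit each remaining block's floor-average center.
import Mathlib
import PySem

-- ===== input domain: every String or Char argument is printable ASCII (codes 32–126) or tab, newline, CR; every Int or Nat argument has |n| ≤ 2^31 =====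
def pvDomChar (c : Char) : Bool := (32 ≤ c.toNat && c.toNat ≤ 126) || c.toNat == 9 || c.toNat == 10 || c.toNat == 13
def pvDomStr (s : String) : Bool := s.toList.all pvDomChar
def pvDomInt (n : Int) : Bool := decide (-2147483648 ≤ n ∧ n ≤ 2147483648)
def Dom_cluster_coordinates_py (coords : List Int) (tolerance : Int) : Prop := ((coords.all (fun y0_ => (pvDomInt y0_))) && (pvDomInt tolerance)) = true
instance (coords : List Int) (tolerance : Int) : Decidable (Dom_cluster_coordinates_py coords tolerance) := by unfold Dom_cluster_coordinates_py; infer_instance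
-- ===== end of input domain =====

-- B replaces A's left-to-right agglomerative scan by top-down divide and conquer
-- on the sorted list: split recursively at the widest gap while it exceeds
-- tolerance, then emit each block's floor-average (objective: alternative
-- algorithm, similar cost).

-- ===== PORT A =====
-- the for-loop of A: state = (current_cluster, clusters); cur is always nonempty,
-- so 'cur.getLastD 0' is current_cluster[-1] and the trailing 'if current_cluster'
-- is ported as the same (always-true) emptiness test.
def pvLoopA (tol : Int) : List Int → List Int → List Int → List Int
  | [], cur, clusters =>
      if cur ≠ [] then clusters ++ [PySem.Int.floordiv cur.sum (cur.length : Int)] else clusters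
  | c :: rest, cur, clusters =>
      if c - cur.getLastD 0 ≤ tol then
        pvLoopA tol rest (cur ++ [c]) clusters
      else
        pvLoopA tol rest [c] (clusters ++ [PySem.Int.floordiv cur.sum (cur.length : Int)])

def cluster_coordinates_py (coords : List Int) (tolerance : Int) : List Int :=
  if coords = [] then []
  else
    match PySem.List.sorted coords (fun x => x) with
    | [] => []   -- unreachable: sorted of a nonempty list is nonempty
    | c0 :: rest => pvLoopA tolerance rest [c0] []

-- ===== PORT B =====
-- seg[i] - seg[i-1], the key of Source B's argmax (indices are in range when used)
def pvGap (seg : List Int) (i : Nat) : Int := seg.getD i 0 - seg.getD (i - 1) 0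

-- Source B's 'max(range(1, len(seg)), key=...)': first index attaining the widest gap
def pvArgMaxGap (seg : List Int) : Nat :=
  (List.range' 2 (seg.length - 2)).foldl
    (fun best i => if pvGap seg best < pvGap seg i then i else best) 1

-- needed by pvSolve's decreasing_by: the chosen split index is in [1, len)
theorem pvArgMaxGap_bounds (seg : List Int) (h : 2 ≤ seg.length) :
    1 ≤ pvArgMaxGap seg ∧ pvArgMaxGap seg < seg.length := by
  have gen : ∀ (l : List Nat) (a : Nat),
      (l.foldl (fun best i => if pvGap seg best < pvGap seg i then i else best) a) = a ∨
      (l.foldl (fun best i => if pvGap seg best < pvGap seg i then i else best) a) ∈ l := by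
    intro l
    induction l with
    | nil => intro a; simp
    | cons x xs ih =>
        intro a
        simp only [List.foldl_cons]
        by_cases hx : pvGap seg a < pvGap seg x
        · rw [if_pos hx]
          rcases ih x with h1 | h1
          · right; simp [h1]
          · right; simp [h1]
        · rw [if_neg hx]
          rcases ih a with h1 | h1
          · left; exact h1
          · right; simp [h1]
  rcases gen (List.range' 2 (seg.length - 2)) 1 with h1 | h1
  · unfold pvArgMaxGap; rw [h1]; omega
  · unfold pvArgMaxGap
    have := List.mem_range'_1.mp h1
    omega

-- the inner recursive 'solve' of Source B
def pvSolve (tol : Int) (seg : List Int) : List Int :=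
  if seg = [] then []
  else if h2 : 2 ≤ seg.length then
    if tol < pvGap seg (pvArgMaxGap seg) then
      pvSolve tol (seg.take (pvArgMaxGap seg)) ++ pvSolve tol (seg.drop (pvArgMaxGap seg))
    else [PySem.Int.floordiv seg.sum (seg.length : Int)]
  else [PySem.Int.floordiv seg.sum (seg.length : Int)]
termination_by seg.length
decreasing_by
  · have := pvArgMaxGap_bounds seg h2
    simp only [List.length_take]
    omega
  · have := pvArgMaxGap_bounds seg h2
    simp only [List.length_drop]
    omega

def cluster_coordinates_py_alt (coords : List Int) (tolerance : Int) : List Int :=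
  pvSolve tolerance (PySem.List.sorted coords (fun x => x))

-- ===== PRECONDITION & SPEC =====
def Spec_cluster_coordinates_py (coords : List Int) (tolerance : Int) (out : List Int) : Prop := out = cluster_coordinates_py_alt coords tolerance
instance (coords : List Int) (tolerance : Int) (out : List Int) : Decidable (Spec_cluster_coordinates_py coords tolerance out) := by unfold Spec_cluster_coordinates_py; infer_instance

-- ===== CLAIM (what is proved, stated in full; the proofs are below) =====
def Claim_equal_cluster_coordinates_py : Prop := ∀ (coords : List Int) (tolerance : Int), Dom_cluster_coordinates_py coords tolerance → Spec_cluster_coordinates_py coords tolerance (cluster_coordinates_py coords tolerance)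

-- ===== LEMMAS AND PROOFS =====

def pvCenter (seg : List Int) : Int := PySem.Int.floordiv seg.sum (seg.length : Int)

-- reference decomposition both ports are reduced to: maximal runs of gaps ≤ tol
def pvRun (tol : Int) (prev : Int) : List Int → List Int × List Int
  | [] => ([], [])
  | x :: xs =>
      if x - prev ≤ tol then
        let p := pvRun tol x xs
        (x :: p.1, p.2)
      else ([], x :: xs)

theorem pvRun_snd_length_le (tol prev : Int) (xs : List Int) :
    (pvRun tol prev xs).2.length ≤ xs.length := by
  induction xs generalizing prev with
  | nil => simp [pvRun]
  | cons x xs ih =>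
      simp only [pvRun]
      split
      · exact Nat.le_succ_of_le (ih x)
      · simp

def pvSegments (tol : Int) : List Int → List (List Int)
  | [] => []
  | x :: xs =>
      let p := pvRun tol x xs
      (x :: p.1) :: pvSegments tol p.2
termination_by xs => xs.length
decreasing_by
  simpa using Nat.lt_succ_of_le (pvRun_snd_length_le tol x xs)

-- A-side: loop invariant relating A's scan to the segment decomposition
theorem pvLoopA_eq (tol : Int) (rest : List Int) :
    ∀ (cur clusters : List Int), cur ≠ [] →
    pvLoopA tol rest cur clusters =
      clusters ++ pvCenter (cur ++ (pvRun tol (cur.getLastD 0) rest).1) ::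
        (pvSegments tol (pvRun tol (cur.getLastD 0) rest).2).map pvCenter := by
  induction rest with
  | nil =>
      intro cur clusters hcur
      simp [pvLoopA, pvRun, pvSegments, hcur, pvCenter]
  | cons c rest ih =>
      intro cur clusters hcur
      by_cases h : c - cur.getLastD 0 ≤ tol
      · rw [pvLoopA, if_pos h]
        rw [ih (cur ++ [c]) clusters (by simp)]
        simp only [pvRun, if_pos h]
        simp
      · rw [pvLoopA, if_neg h]
        rw [ih [c] _ (by simp)]
        simp only [pvRun, if_neg h]
        rw [pvSegments]
        simp [pvCenter]

-- pvRun's leftover is a suffix of its input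
theorem pvRun_snd_suffix (tol prev : Int) (xs : List Int) :
    ∃ pre, xs = pre ++ (pvRun tol prev xs).2 := by
  induction xs generalizing prev with
  | nil => exact ⟨[], by simp [pvRun]⟩
  | cons x xs ih =>
      by_cases h : x - prev ≤ tol
      · rcases ih x with ⟨pre, hpre⟩
        refine ⟨x :: pre, ?_⟩
        simp only [pvRun]
        rw [if_pos h]
        simpa using hpre
      · refine ⟨[], ?_⟩
        simp only [pvRun]
        rw [if_neg h]
        simp


theorem pvRun_cons (tol prev x : Int) (xs : List Int) :
    pvRun tol prev (x :: xs) =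
      if x - prev ≤ tol then (x :: (pvRun tol x xs).1, (pvRun tol x xs).2) else ([], x :: xs) := by
  simp only [pvRun]

theorem pv_getLastD_irrel (l : List Int) (hl : l ≠ []) (d d' : Int) :
    l.getLastD d = l.getLastD d' := by
  cases l with
  | nil => exact absurd rfl hl
  | cons a t => rw [List.getLastD_cons, List.getLastD_cons]

theorem pv_getLastD_append (pre l : List Int) (hl : l ≠ []) (d : Int) :
    (pre ++ l).getLastD d = l.getLastD d := by
  induction pre with
  | nil => rfl
  | cons a t iht =>
      rw [List.cons_append, List.getLastD_cons]
      rw [pv_getLastD_irrel (t ++ l) (by simp [hl]) a d]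
      exact iht

-- chain predicate: every consecutive gap from prev through xs is ≤ tol
def pvChainLe (tol : Int) : Int → List Int → Prop
  | _, [] => True
  | prev, x :: xs => x - prev ≤ tol ∧ pvChainLe tol x xs

-- a chain of small gaps is consumed entirely
theorem pvRun_all (tol : Int) : ∀ (xs : List Int) (prev : Int),
    pvChainLe tol prev xs → pvRun tol prev xs = (xs, []) := by
  intro xs
  induction xs with
  | nil => intro prev _; rfl
  | cons x xs ih =>
      intro prev hch
      rcases hch with ⟨h1, h2⟩
      simp only [pvRun]
      rw [if_pos h1, ih x h2]

theorem pvRun_append (tol : Int) (l : List Int) : ∀ (r : List Int), l ≠ [] → r ≠ [] →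
    tol < r.headD 0 - l.getLastD 0 → ∀ prev,
    pvRun tol prev (l ++ r) = ((pvRun tol prev l).1, (pvRun tol prev l).2 ++ r) := by
  induction l with
  | nil => intro r hl; exact absurd rfl hl
  | cons x xs ih =>
      intro r _ hr hgap prev
      cases xs with
      | nil =>
          rcases r with _ | ⟨r0, r'⟩
          · exact absurd rfl hr
          · have hg : ¬ r0 - x ≤ tol := by
              have e1 : ((r0 :: r').headD 0) = r0 := rfl
              have e2 : (([x] : List Int).getLastD 0) = x := rfl
              rw [e1, e2] at hgap; omega
            simp only [List.cons_append, List.nil_append]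
            by_cases h : x - prev ≤ tol
            · rw [pvRun_cons tol prev x (r0 :: r'), if_pos h,
                  pvRun_cons tol x r0 r', if_neg hg,
                  pvRun_cons tol prev x ([] : List Int), if_pos h]
              simp [pvRun]
            · rw [pvRun_cons tol prev x (r0 :: r'), if_neg h,
                  pvRun_cons tol prev x ([] : List Int), if_neg h]
              simp
      | cons y ys =>
          have hgap' : tol < r.headD 0 - (y :: ys).getLastD 0 := by
            rw [List.getLastD_cons] at hgap
            rwa [pv_getLastD_irrel (y :: ys) (by simp) 0 x]
          have ih' := ih r (by simp) hr hgap' x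
          simp only [List.cons_append] at ih' ⊢
          by_cases h : x - prev ≤ tol
          · rw [pvRun_cons tol prev x (y :: (ys ++ r)), if_pos h,
                pvRun_cons tol prev x (y :: ys), if_pos h, ih']
          · rw [pvRun_cons tol prev x (y :: (ys ++ r)), if_neg h,
                pvRun_cons tol prev x (y :: ys), if_neg h]
            simp

theorem pvSegments_append (tol : Int) : ∀ (n : Nat) (l r : List Int), l.length ≤ n →
    l ≠ [] → r ≠ [] → tol < r.headD 0 - l.getLastD 0 →
    pvSegments tol (l ++ r) = pvSegments tol l ++ pvSegments tol r := by
  intro n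
  induction n with
  | zero =>
      intro l r hn hl _ _
      cases l with
      | nil => exact absurd rfl hl
      | cons x xs => simp at hn
  | succ n ih =>
      intro l r hn hl hr hgap
      cases l with
      | nil => exact absurd rfl hl
      | cons x xs =>
          cases hxs : xs with
          | nil =>
              subst hxs
              rcases r with _ | ⟨r0, r'⟩
              · exact absurd rfl hr
              · have hg : ¬ r0 - x ≤ tol := by
                  have e1 : ((r0 :: r').headD 0) = r0 := rfl
                  have e2 : (([x] : List Int).getLastD 0) = x := rfl
                  rw [e1, e2] at hgap; omega
                rw [List.cons_append, List.nil_append, pvSegments, pvSegments]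
                rw [pvRun_cons tol x r0 r', if_neg hg]
                dsimp only
                simp [pvRun, pvSegments]
          | cons y ys =>
              subst hxs
              have hgap' : tol < r.headD 0 - (y :: ys).getLastD 0 := by
                rw [List.getLastD_cons] at hgap
                rwa [pv_getLastD_irrel (y :: ys) (by simp) 0 x]
              have hrun := pvRun_append tol (y :: ys) r (by simp) hr hgap' x
              rw [List.cons_append, pvSegments, pvSegments]
              simp only [List.cons_append] at hrun ⊢
              rw [hrun]
              dsimp only
              rcases h2 : (pvRun tol x (y :: ys)).2 with _ | ⟨z, zs⟩
              · simp [pvSegments]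
              · rcases pvRun_snd_suffix tol x (y :: ys) with ⟨pre, hpre⟩
                rw [h2] at hpre
                have hlast : (z :: zs).getLastD 0 = (y :: ys).getLastD 0 := by
                  rw [hpre]
                  exact (pv_getLastD_append pre (z :: zs) (by simp) 0).symm
                have hlen : (z :: zs).length ≤ n := by
                  have hle := pvRun_snd_length_le tol x (y :: ys)
                  rw [h2] at hle
                  simp only [List.length_cons] at hle hn ⊢
                  omega
                have hrec := ih (z :: zs) r hlen (by simp) hr (by rw [hlast]; exact hgap')
                simp only [List.cons_append] at hrec ⊢
                rw [hrec]

-- index-gaps ≤ tol implies the chain predicate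
theorem pvChain_of_gaps (tol : Int) : ∀ (xs : List Int) (x : Int),
    (∀ i, 1 ≤ i → i < (x :: xs).length → pvGap (x :: xs) i ≤ tol) →
    pvChainLe tol x xs := by
  intro xs
  induction xs with
  | nil => intro x _; trivial
  | cons y ys ih =>
      intro x h
      refine ⟨?_, ih y ?_⟩
      · have := h 1 (by omega) (by simp)
        simpa [pvGap] using this
      · intro i h1 hi
        have := h (i + 1) (by omega) (by simp only [List.length_cons] at hi ⊢; omega)
        simp only [pvGap] at this ⊢
        rcases i with _ | j
        · omega
        · simpa using this

-- the chosen index really is maximal among gaps 1..len-1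
theorem pvArgMaxGap_max (seg : List Int) (h2 : 2 ≤ seg.length) :
    ∀ i, 1 ≤ i → i < seg.length → pvGap seg i ≤ pvGap seg (pvArgMaxGap seg) := by
  have gen : ∀ (l : List Nat) (a : Nat),
      pvGap seg a ≤ pvGap seg (l.foldl (fun best i => if pvGap seg best < pvGap seg i then i else best) a) ∧
      ∀ x ∈ l, pvGap seg x ≤ pvGap seg (l.foldl (fun best i => if pvGap seg best < pvGap seg i then i else best) a) := by
    intro l
    induction l with
    | nil => intro a; simp
    | cons x xs ih =>
        intro a
        simp only [List.foldl_cons]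
        by_cases hx : pvGap seg a < pvGap seg x
        · rw [if_pos hx]
          refine ⟨le_of_lt (lt_of_lt_of_le hx (ih x).1), ?_⟩
          intro z hz
          rcases List.mem_cons.mp hz with hz | hz
          · rw [hz]; exact (ih x).1
          · exact (ih x).2 z hz
        · rw [if_neg hx]
          refine ⟨(ih a).1, ?_⟩
          intro z hz
          rcases List.mem_cons.mp hz with hz | hz
          · rw [hz]; exact le_trans (le_of_not_gt hx) (ih a).1
          · exact (ih a).2 z hz
  intro i h1 hi
  rcases Nat.eq_or_lt_of_le h1 with h | h
  · have := (gen (List.range' 2 (seg.length - 2)) 1).1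
    rw [← h]; exact this
  · have hmem : i ∈ List.range' 2 (seg.length - 2) := List.mem_range'_1.mpr (by omega)
    exact (gen (List.range' 2 (seg.length - 2)) 1).2 i hmem

-- head/last of drop/take at the split point are the two gap endpoints
theorem pv_drop_headD (seg : List Int) (k : Nat) (hk : k < seg.length) :
    (seg.drop k).headD 0 = seg.getD k 0 := by
  have h : (seg.drop k).head? = seg[k]? := List.head?_drop
  simp [List.headD_eq_head?_getD, List.getD_eq_getElem?_getD, h]

theorem pv_take_getLastD (seg : List Int) (k : Nat) (h1 : 1 ≤ k) (hk : k ≤ seg.length) :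
    (seg.take k).getLastD 0 = seg.getD (k - 1) 0 := by
  have hlen : (seg.take k).length = k := by simp; omega
  have h : (seg.take k).getLast? = (seg.take k)[k - 1]? := by
    rw [List.getLast?_eq_getElem?, hlen]
  rw [List.getLastD_eq_getLast?, h, List.getElem?_take]
  rw [if_pos (by omega : k - 1 < k)]
  simp [List.getD_eq_getElem?_getD]

-- B-side: pvSolve computes the centers of the segment decomposition
theorem pvSolve_eq (tol : Int) : ∀ (n : Nat) (s : List Int), s.length ≤ n →
    pvSolve tol s = (pvSegments tol s).map pvCenter := by
  intro n
  induction n with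
  | zero =>
      intro s hn
      have hs : s = [] := List.length_eq_zero_iff.mp (Nat.le_zero.mp hn)
      subst hs
      simp [pvSolve, pvSegments]
  | succ n ih =>
      intro s hn
      by_cases hs : s = []
      · subst hs; simp [pvSolve, pvSegments]
      · by_cases h2 : 2 ≤ s.length
        · rw [pvSolve, if_neg hs, dif_pos h2]
          have hb := pvArgMaxGap_bounds s h2
          by_cases hg : tol < pvGap s (pvArgMaxGap s)
          · rw [if_pos hg]
            have htne : s.take (pvArgMaxGap s) ≠ [] := by
              intro hemp
              have hl := congrArg List.length hemp
              rw [List.length_take] at hl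
              simp only [List.length_nil] at hl
              omega
            have hdne : s.drop (pvArgMaxGap s) ≠ [] := by
              intro hemp
              have hl := congrArg List.length hemp
              rw [List.length_drop] at hl
              simp only [List.length_nil] at hl
              omega
            have hgap : tol < (s.drop (pvArgMaxGap s)).headD 0 - (s.take (pvArgMaxGap s)).getLastD 0 := by
              rw [pv_drop_headD s (pvArgMaxGap s) (by omega),
                  pv_take_getLastD s (pvArgMaxGap s) (by omega) (by omega)]
              exact hg
            have hseg : pvSegments tol s =
                pvSegments tol (s.take (pvArgMaxGap s)) ++ pvSegments tol (s.drop (pvArgMaxGap s)) := by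
              conv_lhs => rw [← List.take_append_drop (pvArgMaxGap s) s]
              exact pvSegments_append tol s.length (s.take (pvArgMaxGap s)) (s.drop (pvArgMaxGap s))
                (by simp) htne hdne hgap
            rw [hseg, List.map_append]
            have hlt : (s.take (pvArgMaxGap s)).length ≤ n := by
              have h1 := List.length_take_le (pvArgMaxGap s) s
              omega
            have hld : (s.drop (pvArgMaxGap s)).length ≤ n := by
              have h1 : (s.drop (pvArgMaxGap s)).length = s.length - pvArgMaxGap s :=
                List.length_drop ..
              omega
            rw [ih (s.take (pvArgMaxGap s)) hlt, ih (s.drop (pvArgMaxGap s)) hld]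
          · rw [if_neg hg]
            rcases s with _ | ⟨x, xs⟩
            · exact absurd rfl hs
            · have hall : ∀ i, 1 ≤ i → i < (x :: xs).length → pvGap (x :: xs) i ≤ tol := by
                intro i hi1 hi2
                exact le_trans (pvArgMaxGap_max (x :: xs) h2 i hi1 hi2) (le_of_not_gt hg)
              have hch := pvChain_of_gaps tol xs x hall
              rw [pvSegments]
              simp only [pvRun_all tol xs x hch]
              simp [pvSegments, pvCenter]
        · rcases s with _ | ⟨x, xs⟩
          · exact absurd rfl hs
          · rcases xs with _ | ⟨y, ys⟩
            · simp [pvSolve, pvSegments, pvRun, pvCenter]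
            · simp at h2

-- ===== VERDICT (by name: the statement is the Claim_ definition above) =====
theorem cluster_coordinates_py_spec : Claim_equal_cluster_coordinates_py := by
  intro coords tolerance _
  unfold Spec_cluster_coordinates_py cluster_coordinates_py cluster_coordinates_py_alt
  by_cases hc : coords = []
  · subst hc
    have h : (PySem.List.sorted ([] : List Int) (fun x => x)) = [] := by
      have := PySem.List.sorted_perm (xs := ([] : List Int)) (key := fun x => x) (rev := false)
      exact List.perm_nil.mp this
    simp [h, pvSolve]
  · rw [if_neg hc]
    rcases hs : PySem.List.sorted coords (fun x => x) with _ | ⟨c0, rest⟩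
    · have h2 := PySem.List.sorted_perm (xs := coords) (key := fun x => x) (rev := false)
      rw [hs] at h2
      exact absurd (List.perm_nil.mp h2.symm) hc
    · show pvLoopA tolerance rest [c0] [] = pvSolve tolerance (c0 :: rest)
      rw [pvLoopA_eq tolerance rest [c0] [] (by simp)]
      rw [pvSolve_eq tolerance (c0 :: rest).length (c0 :: rest) le_rfl]
      rw [pvSegments]
      simp [pvCenter]
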